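-- pv_equiv track=rewrite | github.com/MiZuii/AOC_2023 | day12/puzzle1.py | gen_perms
-- ===== SOURCE A (Python) =====
-- def gen_perms(noh, nod, l, pref=""):
--
--     # recursion depth
--     if noh == 0 and nod == 0:
--         l.append(pref)
--
--     if noh != 0:
--         gen_perms(noh-1, nod, l, pref + "#")
--     if nod != 0:
--         gen_perms(noh, nod-1, l, pref + ".")
--
--     return l
-- ===== SOURCE B (Python) =====
-- # Bottom-up dynamic programming over dot-counts instead of A's top-down recursion
-- # on the prefix; same in-place append to l (return value and mutation match A's).
-- def gen_perms(noh, nod, l, pref=""):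
--     # prev[k] = all orderings of h '#' and k '.' in ascending order, for current h
--     prev = [["." * k] for k in range(nod + 1)]          # h = 0
--     for _ in range(noh):                                # raise h by one
--         row = ["#" + s for s in prev[0]]
--         curr = [row]
--         for d2 in range(1, nod + 1):
--             row = ["#" + s for s in prev[d2]] + ["." + s for s in row]
--             curr.append(row)
--         prev = curr
--     for s in prev[nod]:
--         l.append(pref + s)
--     return l
-- ===== Notes on version B (the rewrite author's own statement) =====
-- stated objective: alternative
-- what changed: Replaces A's top-down recursion over the growing prefix by a bottom-up Pascal-style dynamic programming table over dot-counts, prepending '#'/'.' to suffix lists; Pre_ excludes negative counts, on which A exceeds the recursion limit (RecursionError).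
import Mathlib
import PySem

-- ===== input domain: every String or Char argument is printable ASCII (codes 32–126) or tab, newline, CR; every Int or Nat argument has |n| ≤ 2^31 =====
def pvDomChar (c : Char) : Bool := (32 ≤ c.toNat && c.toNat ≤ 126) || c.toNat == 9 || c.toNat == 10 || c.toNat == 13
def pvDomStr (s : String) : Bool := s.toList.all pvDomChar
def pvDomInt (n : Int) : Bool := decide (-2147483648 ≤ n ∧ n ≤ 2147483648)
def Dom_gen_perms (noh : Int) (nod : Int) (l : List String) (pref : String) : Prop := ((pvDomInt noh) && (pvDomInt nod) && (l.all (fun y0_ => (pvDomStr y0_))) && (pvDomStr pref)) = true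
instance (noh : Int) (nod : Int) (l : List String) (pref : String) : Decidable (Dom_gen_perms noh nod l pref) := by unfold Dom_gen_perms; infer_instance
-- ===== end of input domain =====

-- B replaces A's top-down prefix recursion by a bottom-up DP table over dot-counts (objective:
-- alternative, same cost). Python A and B both mutate l by appending the same strings in the same
-- order; the theorems here are about the returned value.

-- ===== PORT A =====
-- Literal port of A's recursion. The inner 'if 0 < noh' / 'if 0 < nod' dites are totality guards
-- only: for a negative count Python A recurses without base case (RecursionError), outside Pre_.
def gen_perms (noh : Int) (nod : Int) (l : List String) (pref : String) : List String :=
  let l1 := if noh = 0 ∧ nod = 0 then l ++ [pref] else l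
  let l2 := if noh ≠ 0 then
      (if _h : 0 < noh then gen_perms (noh - 1) nod l1 (pref ++ "#") else l1)
    else l1
  let l3 := if nod ≠ 0 then
      (if _h : 0 < nod then gen_perms noh (nod - 1) l2 (pref ++ ".") else l2)
    else l2
  l3
termination_by (noh.toNat + nod.toNat)
decreasing_by all_goals omega

-- ===== PORT B =====
-- body of B's inner loop:  row = ["#" + s for s in prev[d2]] + ["." + s for s in row]; curr.append(row)
-- (state cr = (curr, row)); prev[d2] is in range under Pre_, so .getD [] is never taken in Python.
def pvBInner (prev : List (List String)) (cr : List (List String) × List String) (d2 : Int) :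
    List (List String) × List String :=
  let row := ((PySem.List.pyGet? prev d2).getD []).map (fun s => "#" ++ s)
             ++ cr.2.map (fun s => "." ++ s)
  (cr.1 ++ [row], row)

-- body of B's outer loop (one pass raising the '#' count by one)
def pvBOuter (nod : Int) (prev : List (List String)) (_i : Int) : List (List String) :=
  let row0 := ((PySem.List.pyGet? prev 0).getD []).map (fun s => "#" ++ s)
  ((PySem.List.pyRange 1 (nod + 1) 1).foldl (pvBInner prev) ([row0], row0)).1

def gen_perms_alt (noh : Int) (nod : Int) (l : List String) (pref : String) : List String :=
  -- prev = [["." * k] for k in range(nod + 1)]   ("." * k ported by hand as a replicate; exact for k ≥ 0, which range guarantees)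
  let prev0 := (PySem.List.pyRange 0 (nod + 1) 1).map
      (fun k => [String.ofList (List.replicate k.toNat '.')])
  let prev := (PySem.List.pyRange 0 noh 1).foldl (pvBOuter nod) prev0
  l ++ ((PySem.List.pyGet? prev nod).getD []).map (fun s => pref ++ s)

-- ===== PRECONDITION & SPEC =====
-- Pre_ excludes negative counts: there Python A recurses with no reachable base case and raises
-- RecursionError (it never returns), so nothing is claimed about those inputs.
def Pre_gen_perms (noh : Int) (nod : Int) (l : List String) (pref : String) : Prop :=
  0 ≤ noh ∧ 0 ≤ nod
instance (noh : Int) (nod : Int) (l : List String) (pref : String) : Decidable (Pre_gen_perms noh nod l pref) := by unfold Pre_gen_perms; infer_instance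

def pvWitness_gen_perms : Int × Int × List String × String := (2, 1, ["q"], "x")

def Spec_gen_perms (noh : Int) (nod : Int) (l : List String) (pref : String) (out : List String) : Prop := out = gen_perms_alt noh nod l pref
instance (noh : Int) (nod : Int) (l : List String) (pref : String) (out : List String) : Decidable (Spec_gen_perms noh nod l pref out) := by unfold Spec_gen_perms; infer_instance

-- ===== CLAIM (what is proved, stated in full; the proofs are below) =====
def Claim_equal_gen_perms : Prop := ∀ (noh : Int) (nod : Int) (l : List String) (pref : String), Dom_gen_perms noh nod l pref → Pre_gen_perms noh nod l pref → Spec_gen_perms noh nod l pref (gen_perms noh nod l pref)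

-- ===== LEMMAS AND PROOFS =====

-- The list of orderings of h '#' and d '.' in A's emission order ('#'-branch first).
def Sgen : Nat → Nat → List String
  | 0, d => [String.ofList (List.replicate d '.')]
  | h+1, 0 => (Sgen h 0).map (fun s => "#" ++ s)
  | h+1, d+1 => (Sgen h (d+1)).map (fun s => "#" ++ s) ++ (Sgen (h+1) d).map (fun s => "." ++ s)

theorem A_char : ∀ (n h d : Nat), h + d ≤ n → ∀ (l : List String) (pref : String),
    gen_perms (h : Int) (d : Int) l pref = l ++ (Sgen h d).map (fun s => pref ++ s) := by
  intro n
  induction n with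
  | zero =>
    intro h d hle l pref
    have h0 : h = 0 := by omega
    have d0 : d = 0 := by omega
    subst h0; subst d0
    rw [gen_perms]; simp [Sgen]
  | succ n ih =>
    intro h d hle l pref
    match h, d with
    | 0, 0 => rw [gen_perms]; simp [Sgen]
    | h+1, 0 =>
      rw [gen_perms]
      have e1 : ((h+1 : Nat) : Int) - 1 = ((h : Nat) : Int) := by push_cast; ring
      split_ifs with c1 c2 c3 <;> first
        | (exfalso; omega)
        | (rw [e1, ih h 0 (by omega)]
           simp [Sgen, List.map_map, Function.comp_def, String.append_assoc])
    | 0, d+1 =>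
      rw [gen_perms]
      have e1 : ((d+1 : Nat) : Int) - 1 = ((d : Nat) : Int) := by push_cast; ring
      split_ifs with c1 c2 c3 <;> first
        | (exfalso; omega)
        | (rw [e1, ih 0 d (by omega)]
           have edot : "." ++ String.ofList (List.replicate d '.') = String.ofList (List.replicate (d+1) '.') := by
             apply String.ext; simp [List.replicate_succ]
           simp [Sgen, String.append_assoc, edot])
    | h+1, d+1 =>
      rw [gen_perms]
      have e1 : ((h+1 : Nat) : Int) - 1 = ((h : Nat) : Int) := by push_cast; ring
      have e2 : ((d+1 : Nat) : Int) - 1 = ((d : Nat) : Int) := by push_cast; ring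
      split_ifs with c1 c2 c3 c4 c5 <;> first
        | (exfalso; omega)
        | (rw [e1, e2, ih h (d+1) (by omega), ih (h+1) d (by omega)]
           simp [Sgen, List.map_map, Function.comp_def, String.append_assoc])

theorem inner_lemma (h d : Nat) : ∀ m, m ≤ d →
    (PySem.List.pyRange 1 ((m : Int) + 1) 1).foldl
        (pvBInner ((List.range (d+1)).map (fun k => Sgen h k)))
        ([Sgen (h+1) 0], Sgen (h+1) 0)
    = ((List.range (m+1)).map (fun k => Sgen (h+1) k), Sgen (h+1) m) := by
  intro m
  induction m with
  | zero =>
    intro _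
    rw [PySem.List.pyRange_one_eq_nil (by norm_num)]
    simp
  | succ m ih =>
    intro hm
    have e : ((m+1 : Nat) : Int) + 1 = (((m : Nat) : Int) + 1) + 1 := by push_cast; ring
    rw [e, PySem.List.pyRange_one_succ_right (by omega), List.foldl_append, ih (by omega)]
    simp only [List.foldl_cons, List.foldl_nil]
    unfold pvBInner
    have e2 : ((m : Nat) : Int) + 1 = ((m+1 : Nat) : Int) := by push_cast; ring
    rw [e2, PySem.List.pyGet?_natCast]
    have hlt : m + 1 < d + 1 := by omega
    have hget : ((List.range (d+1)).map (fun k => Sgen h k))[m+1]? = some (Sgen h (m+1)) := by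
      simp [hlt]
    simp only [hget, Option.getD_some]
    simp [Sgen, List.range_succ]

theorem outer_lemma (d : Nat) : ∀ h : Nat,
    (PySem.List.pyRange 0 (h : Int) 1).foldl (pvBOuter (d : Int))
        ((List.range (d+1)).map (fun k => Sgen 0 k))
    = (List.range (d+1)).map (fun k => Sgen h k) := by
  intro h
  induction h with
  | zero =>
    rw [PySem.List.pyRange_one_eq_nil (by norm_num)]
    simp
  | succ h ih =>
    have e : ((h+1 : Nat) : Int) = ((h : Nat) : Int) + 1 := by push_cast; ring
    rw [e, PySem.List.pyRange_one_succ_right (by omega), List.foldl_append, ih]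
    simp only [List.foldl_cons, List.foldl_nil]
    unfold pvBOuter
    have hrow0 : ((PySem.List.pyGet? ((List.range (d+1)).map (fun k => Sgen h k)) 0).getD []).map (fun s => "#" ++ s) = Sgen (h+1) 0 := by
      simp [Sgen]
    rw [hrow0]
    simp only [inner_lemma h d d le_rfl]

theorem B_char (h d : Nat) (l : List String) (pref : String) :
    gen_perms_alt (h : Int) (d : Int) l pref = l ++ (Sgen h d).map (fun s => pref ++ s) := by
  unfold gen_perms_alt
  have hprev0 : (PySem.List.pyRange 0 ((d : Int) + 1) 1).map
      (fun k => [String.ofList (List.replicate k.toNat '.')])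
      = (List.range (d+1)).map (fun k => Sgen 0 k) := by
    rw [PySem.List.pyRange_one]
    simp only [List.map_map]
    apply List.map_congr_left
    intro k _
    simp [Sgen]
  simp only [hprev0, outer_lemma d h, PySem.List.pyGet?_natCast]
  simp

-- ===== VERDICT (by name: the statement is the Claim_ definition above) =====
theorem gen_perms_spec : Claim_equal_gen_perms := by
  intro noh nod l pref _hdom hpre
  obtain ⟨h1, h2⟩ := hpre
  lift noh to ℕ using h1 with h
  lift nod to ℕ using h2 with d
  unfold Spec_gen_perms
  rw [A_char (h + d) h d le_rfl, B_char]
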